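-- pv_equiv track=rewrite | github.com/bruna-barbosa/sudoku-solver | classes.py | get_col_fit
-- ===== SOURCE A (Python) =====
-- def get_col_fit(col):
--
--     result = 0
--     for index, value in enumerate(col):
--         for index_, value_ in enumerate(col):
--             if index == index_:
--                 pass
--             else:
--                 if (value == 0) | (value == value_):
--                     result += 1
--
--     return result
-- ===== SOURCE B (Python) =====
-- def get_col_fit(col):
--     cnt = {}
--     for v in col:
--         cnt[v] = cnt.get(v, 0) + 1
--     n = len(col)
--     return sum(n - 1 if v == 0 else cnt[v] - 1 for v in col)
-- ===== Notes on version B (the rewrite author's own statement) =====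
-- stated objective: faster
-- what changed: Replaces the quadratic all-pairs double loop with a single frequency-count pass: each zero contributes n-1 and each nonzero value contributes count[value]-1.
import Mathlib
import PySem

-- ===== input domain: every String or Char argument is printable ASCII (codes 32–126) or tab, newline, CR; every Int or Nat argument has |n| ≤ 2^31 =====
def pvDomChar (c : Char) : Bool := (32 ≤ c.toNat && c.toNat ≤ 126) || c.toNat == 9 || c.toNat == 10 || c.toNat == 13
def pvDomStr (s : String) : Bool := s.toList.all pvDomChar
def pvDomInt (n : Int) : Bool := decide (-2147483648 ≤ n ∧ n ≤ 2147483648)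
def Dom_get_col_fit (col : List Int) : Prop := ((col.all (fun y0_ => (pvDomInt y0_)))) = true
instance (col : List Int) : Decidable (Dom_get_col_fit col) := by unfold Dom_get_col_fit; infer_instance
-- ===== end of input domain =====

-- B replaces A's quadratic all-pairs scan by one frequency-count pass (objective: faster, asymptotic).

-- ===== PORT A =====
def get_col_fit (col : List Int) : Int :=
  (PySem.List.enumerate col).foldl (fun result iv =>
    (PySem.List.enumerate col).foldl (fun r jv =>
      if iv.1 = jv.1 then r
      else if iv.2 = 0 ∨ iv.2 = jv.2 then r + 1 else r) result) 0

-- ===== PORT B =====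
def get_col_fit_alt (col : List Int) : Int :=
  let cnt := col.foldl (fun d v => d.insert v (d.getD v 0 + 1)) PySem.Dict.empty
  let n : Int := col.length
  (col.map (fun v => if v = 0 then n - 1 else cnt.getD v 0 - 1)).sum

-- ===== PRECONDITION & SPEC =====
def Spec_get_col_fit (col : List Int) (out : Int) : Prop := out = get_col_fit_alt col
instance (col : List Int) (out : Int) : Decidable (Spec_get_col_fit col out) := by unfold Spec_get_col_fit; infer_instance

-- ===== CLAIM (what is proved, stated in full; the proofs are below) =====
def Claim_equal_get_col_fit : Prop := ∀ (col : List Int), Dom_get_col_fit col → Spec_get_col_fit col (get_col_fit col)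

-- ===== LEMMAS AND PROOFS =====

-- inner-loop body rewritten additively
lemma pv_inner_body (i v : Int) (col : List Int) (r : Int) :
    (PySem.List.enumerate col).foldl (fun r jv =>
      if i = jv.1 then r
      else if v = 0 ∨ v = jv.2 then r + 1 else r) r
    = r + ((PySem.List.enumerate col).map (fun jv =>
        if i = jv.1 then 0 else if v = 0 ∨ v = jv.2 then (1:Int) else 0)).sum := by
  have := PySem.List.foldl_add (l := PySem.List.enumerate col) (a := r)
    (g := fun jv : Int × Int => if i = jv.1 then 0 else if v = 0 ∨ v = jv.2 then (1:Int) else 0)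
  rw [← this]
  apply List.foldl_ext
  intro a p _
  by_cases h1 : i = p.1 <;> by_cases h2 : v = 0 ∨ v = p.2 <;> simp [h1, h2]

-- sum over a pair list none of whose fsts equal i
lemma pv_sum_no_i (i v : Int) (t : List (Int × Int)) (h : ∀ q ∈ t, q.1 ≠ i) :
    (t.map (fun jv => if i = jv.1 then 0 else if v = 0 ∨ v = jv.2 then (1:Int) else 0)).sum
    = if v = 0 then (t.length : Int) else (t.map Prod.snd).count v := by
  induction t with
  | nil => simp
  | cons p t ih =>
    have hp : p.1 ≠ i := h p (by simp)
    have ht : ∀ q ∈ t, q.1 ≠ i := fun q hq => h q (by simp [hq])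
    have hip : ¬ (i = p.1) := fun e => hp e.symm
    simp only [List.map_cons, List.sum_cons, ih ht, hip, if_false, List.length_cons,
      List.count_cons]
    by_cases h0 : v = 0
    · simp [h0]
      omega
    · by_cases h2 : v = p.2
      · simp [h2]
        rw [← h2, if_neg h0, if_neg h0]
        ring
      · have : ¬ (p.2 = v) := fun e => h2 e.symm
        simp [h0, h2, this]

-- main inner-sum characterisation
lemma pv_sum_inner (i v : Int) (l : List (Int × Int))
    (hmem : (i, v) ∈ l) (hpw : l.Pairwise (fun p q => p.1 ≠ q.1)) :
    (l.map (fun jv => if i = jv.1 then 0 else if v = 0 ∨ v = jv.2 then (1:Int) else 0)).sum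
    = (if v = 0 then (l.length : Int) else (l.map Prod.snd).count v) - 1 := by
  induction l with
  | nil => simp at hmem
  | cons p t ih =>
    rcases List.mem_cons.mp hmem with heq | htl
    · subst heq
      have ht : ∀ q ∈ t, q.1 ≠ i := by
        intro q hq
        exact fun e => (List.pairwise_cons.mp hpw).1 q hq (by simp [e])
      simp only [List.map_cons, List.sum_cons, pv_sum_no_i i v t ht,
        List.length_cons, List.count_cons]
      by_cases h0 : v = 0
      · simp [h0]
      · simp [h0]
    · have hpw' := (List.pairwise_cons.mp hpw).2
      have hpi : p.1 ≠ i := by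
        have := (List.pairwise_cons.mp hpw).1 (i, v) htl
        simpa using this
      have hip : ¬ (i = p.1) := fun e => hpi e.symm
      simp only [List.map_cons, List.sum_cons, hip, if_false, ih htl hpw',
        List.length_cons, List.count_cons]
      by_cases h0 : v = 0
      · simp [h0]
      · by_cases h2 : v = p.2
        · simp [h0, ← h2]
        · have : ¬ (p.2 = v) := fun e => h2 e.symm
          simp [h0, h2, this]

-- ===== VERDICT (by name: the statement is the Claim_ definition above) =====
theorem get_col_fit_spec : Claim_equal_get_col_fit := by
  intro col _
  unfold Spec_get_col_fit get_col_fit get_col_fit_alt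
  rw [PySem.Dict.foldl_insert_getD_add_one_eq_counter]
  have hpw : (PySem.List.enumerate col).Pairwise (fun p q : Int × Int => p.1 ≠ q.1) :=
    (PySem.List.pairwise_lt_enumerate (xs := col) (s := 0)).imp (fun h => ne_of_lt h)
  -- rewrite the outer loop additively
  have houter := PySem.List.foldl_add (l := PySem.List.enumerate col) (a := (0:Int))
    (g := fun iv : Int × Int =>
      ((PySem.List.enumerate col).map (fun jv =>
        if iv.1 = jv.1 then 0 else if iv.2 = 0 ∨ iv.2 = jv.2 then (1:Int) else 0)).sum)
  have hfold : (PySem.List.enumerate col).foldl (fun result iv =>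
      (PySem.List.enumerate col).foldl (fun r jv =>
        if iv.1 = jv.1 then r
        else if iv.2 = 0 ∨ iv.2 = jv.2 then r + 1 else r) result) 0
      = ((PySem.List.enumerate col).map (fun iv : Int × Int =>
          ((PySem.List.enumerate col).map (fun jv =>
            if iv.1 = jv.1 then 0 else if iv.2 = 0 ∨ iv.2 = jv.2 then (1:Int) else 0)).sum)).sum := by
    have h1 : (PySem.List.enumerate col).foldl (fun result iv =>
        (PySem.List.enumerate col).foldl (fun r jv =>
          if iv.1 = jv.1 then r
          else if iv.2 = 0 ∨ iv.2 = jv.2 then r + 1 else r) result) 0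
      = (PySem.List.enumerate col).foldl (fun acc iv =>
          acc + ((PySem.List.enumerate col).map (fun jv =>
            if iv.1 = jv.1 then 0 else if iv.2 = 0 ∨ iv.2 = jv.2 then (1:Int) else 0)).sum) 0 := by
      apply List.foldl_ext
      intro a p _
      exact pv_inner_body p.1 p.2 col a
    rw [h1, houter, zero_add]
  rw [hfold]
  -- evaluate each inner sum via pv_sum_inner, then push everything to a map over col
  have hmapeq : (PySem.List.enumerate col).map (fun iv : Int × Int =>
      ((PySem.List.enumerate col).map (fun jv =>
        if iv.1 = jv.1 then 0 else if iv.2 = 0 ∨ iv.2 = jv.2 then (1:Int) else 0)).sum)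
      = (PySem.List.enumerate col).map (fun iv : Int × Int =>
          (if iv.2 = 0 then ((PySem.List.enumerate col).length : Int)
           else ((PySem.List.enumerate col).map Prod.snd).count iv.2) - 1) := by
    apply List.map_congr_left
    intro p hp
    exact pv_sum_inner p.1 p.2 _ (by rcases p with ⟨i, v⟩; exact hp) hpw
  rw [hmapeq]
  rw [show ((PySem.List.enumerate col).map (fun iv : Int × Int =>
      (if iv.2 = 0 then ((PySem.List.enumerate col).length : Int)
       else ((PySem.List.enumerate col).map Prod.snd).count iv.2) - 1))
    = ((PySem.List.enumerate col).map Prod.snd).map (fun v : Int =>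
      (if v = 0 then ((PySem.List.enumerate col).length : Int)
       else ((PySem.List.enumerate col).map Prod.snd).count v) - 1) from by
        rw [List.map_map]; rfl]
  rw [PySem.List.map_snd_enumerate, PySem.List.length_enumerate]
  apply congrArg
  apply List.map_congr_left
  intro v _
  rw [PySem.Dict.getD_counter]
  by_cases h0 : v = 0 <;> simp [h0]
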